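-- pv_equiv track=rewrite | github.com/xyyyt/random-exercices-python | exercises/compute_check_code.py | compute_check_code
-- ===== SOURCE A (Python) =====
-- from typing import Optional
--
-- def compute_check_code(s : str) -> Optional[int]:
--     if not s or not s.isnumeric():
--         return None
--
--     sum_of_numbers_on_even_indexes : int = 0
--     sum_of_numbers_on_odd_indexes : int = 0
--     n : int = 0
--
--     while n < len(s):
--         if n % 2 == 0:
--             sum_of_numbers_on_even_indexes += int(s[n])
--         else:
--             sum_of_numbers_on_odd_indexes += int(s[n])
--
--         n += 1
--
--     check_code : int = sum_of_numbers_on_even_indexes * 3 + sum_of_numbers_on_odd_indexes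
--
--     return check_code if check_code % 10 == 0 else check_code - 7
-- ===== SOURCE B (Python) =====
-- def compute_check_code(s):
--     if not s or not s.isnumeric():
--         return None
--
--     check = sum(int(c) for c in s[::2]) * 3 + sum(int(c) for c in s[1::2])
--
--     return check if check % 10 == 0 else check - 7
-- ===== Notes on version B (the rewrite author's own statement) =====
-- stated objective: simpler
-- what changed: Replaces the index-walking while-loop with its n%2 branch and two running accumulators by two stride-2 slices (s[::2], s[1::2]) summed directly and combined in one expression.
import Mathlib
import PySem

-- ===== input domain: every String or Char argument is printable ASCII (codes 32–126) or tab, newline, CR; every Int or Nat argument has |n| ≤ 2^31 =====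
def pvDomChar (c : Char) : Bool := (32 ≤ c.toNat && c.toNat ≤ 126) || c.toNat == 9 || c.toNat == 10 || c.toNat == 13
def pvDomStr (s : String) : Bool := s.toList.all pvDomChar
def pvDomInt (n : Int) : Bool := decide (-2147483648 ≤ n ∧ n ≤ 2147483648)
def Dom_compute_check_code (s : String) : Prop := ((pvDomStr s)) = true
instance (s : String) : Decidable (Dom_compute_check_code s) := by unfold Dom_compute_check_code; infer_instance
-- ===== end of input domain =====

-- B replaces A's index-walking while-loop (n % 2 branch, two accumulators) by two
-- stride-2 slices summed directly; objective: simpler. Return values are proved equal.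

-- int(c) for a single character c; exact when c is an ASCII digit — both programs only
-- apply it under the isnumeric guard, which on the printable-ASCII domain means digits 0-9.
def pyIntChar (c : Char) : Int := (PySem.Int.ofChars? [c]).getD 0

-- ===== PORT A =====
-- the while loop: walks the characters with the running index n and the two accumulators
def ccLoopA : List Char → Nat → Int → Int → Int × Int
  | [], _, se, so => (se, so)
  | c :: rest, n, se, so =>
    if n % 2 = 0 then ccLoopA rest (n + 1) (se + pyIntChar c) so
    else ccLoopA rest (n + 1) se (so + pyIntChar c)

-- s.isnumeric() ported as strIsdigit: exact on the printable-ASCII domain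
def compute_check_code (s : String) : Option Int :=
  if s.toList.length = 0 || !PySem.Str.strIsdigit s then none
  else
    let p := ccLoopA s.toList 0 0 0
    let check := p.1 * 3 + p.2
    if PySem.Int.mod check 10 = 0 then some check else some (check - 7)

-- ===== PORT B =====
def compute_check_code_alt (s : String) : Option Int :=
  if s.toList.length = 0 || !PySem.Str.strIsdigit s then none
  else
    -- s[::2] and s[1::2]; step 2 ≠ 0 so slice? always returns some
    let ev := (PySem.List.slice? s.toList none none 2).getD []
    let od := (PySem.List.slice? s.toList (some 1) none 2).getD []
    let check := (ev.foldl (fun a c => a + pyIntChar c) 0) * 3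
                 + (od.foldl (fun a c => a + pyIntChar c) 0)
    if PySem.Int.mod check 10 = 0 then some check else some (check - 7)

-- ===== PRECONDITION & SPEC =====
def Spec_compute_check_code (s : String) (out : Option Int) : Prop := out = compute_check_code_alt s
instance (s : String) (out : Option Int) : Decidable (Spec_compute_check_code s out) := by unfold Spec_compute_check_code; infer_instance

-- ===== CLAIM (what is proved, stated in full; the proofs are below) =====
def Claim_equal_compute_check_code : Prop := ∀ (s : String), Dom_compute_check_code s → Spec_compute_check_code s (compute_check_code s)

-- ===== LEMMAS AND PROOFS =====

-- elements at even indices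
def ccEvens : List Char → List Char
  | [] => []
  | [a] => [a]
  | a :: _ :: t => a :: ccEvens t

lemma ccEvens_cons (c : Char) (t : List Char) : ccEvens (c :: t) = c :: ccEvens t.tail := by
  cases t <;> rfl

lemma filterMap_range_evens (xs : List Char) :
    List.filterMap (fun k : Nat => xs[2 * k]?) (List.range ((xs.length + 1) / 2)) = ccEvens xs := by
  induction xs using ccEvens.induct with
  | case1 => rfl
  | case2 a => simp [List.range_succ, ccEvens]
  | case3 a b t ih =>
    have hlen : (((a :: b :: t).length + 1) / 2) = (t.length + 1) / 2 + 1 := by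
      simp only [List.length_cons]; omega
    rw [hlen, List.range_succ_eq_map, List.filterMap_cons, List.filterMap_map]
    have h0 : ((a :: b :: t)[2 * 0]?) = some a := rfl
    rw [h0]
    have hfun : (fun k : Nat => (a :: b :: t)[2 * k]?) ∘ Nat.succ = fun k : Nat => t[2 * k]? := by
      funext k
      have h2 : 2 * Nat.succ k = 2 * k + 1 + 1 := by omega
      simp [Function.comp, h2]
    rw [hfun, ih, ccEvens]

lemma slice2_evens (xs : List Char) :
    PySem.List.slice? xs none none 2 = some (ccEvens xs) := by
  rw [PySem.List.slice?, PySem.List.sliceIndices]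
  simp only [if_neg (by norm_num : ¬ (2:Int) = 0)]
  norm_num
  rw [← filterMap_range_evens xs]
  congr 1
  congr 1
  split <;> omega

lemma slice2_odds (xs : List Char) :
    PySem.List.slice? xs (some 1) none 2 = some (ccEvens xs.tail) := by
  rw [PySem.List.slice?, PySem.List.sliceIndices]
  simp only [if_neg (by norm_num : ¬ (2:Int) = 0)]
  norm_num
  cases xs with
  | nil => simp [ccEvens]
  | cons a t =>
    have hstart : min (1:Int) ((a :: t).length) = 1 := by
      simp only [List.length_cons]; omega
    rw [hstart]
    simp only [List.tail_cons]
    rw [← filterMap_range_evens t]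
    congr 1
    · funext k
      rw [show ((1 : Int) + 2 * (k:Int)).toNat = 2 * k + 1 by omega]
      simp
    · congr 1
      simp only [List.length_cons]
      split <;> omega

-- sums over the two parity classes
def ccE (cs : List Char) : Int := ((ccEvens cs).map pyIntChar).sum
def ccO (cs : List Char) : Int := ((ccEvens cs.tail).map pyIntChar).sum

lemma ccE_cons (c : Char) (t : List Char) : ccE (c :: t) = pyIntChar c + ccO t := by
  simp [ccE, ccO, ccEvens_cons]

lemma ccO_cons (c : Char) (t : List Char) : ccO (c :: t) = ccE t := by
  simp [ccE, ccO]

lemma ccLoopA_eq (cs : List Char) : ∀ (n : Nat) (se so : Int),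
    ccLoopA cs n se so =
      if n % 2 = 0 then (se + ccE cs, so + ccO cs) else (se + ccO cs, so + ccE cs) := by
  induction cs with
  | nil => intro n se so; simp [ccLoopA, ccE, ccO, ccEvens]
  | cons c t ih =>
    intro n se so
    rw [ccLoopA]
    by_cases h : n % 2 = 0
    · have h1 : (n + 1) % 2 ≠ 0 := by omega
      rw [if_pos h, ih, if_neg h1, if_pos h, ccE_cons, ccO_cons]
      ring_nf
    · have h1 : (n + 1) % 2 = 0 := by omega
      rw [if_neg h, ih, if_pos h1, if_neg h, ccE_cons, ccO_cons]
      ring_nf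

-- ===== VERDICT (by name: the statement is the Claim_ definition above) =====
theorem compute_check_code_spec : Claim_equal_compute_check_code := by
  intro s _
  unfold Spec_compute_check_code compute_check_code compute_check_code_alt
  by_cases hg : (s.toList.length = 0 || !PySem.Str.strIsdigit s) = true
  · rw [if_pos hg, if_pos hg]
  · rw [if_neg hg, if_neg hg]
    have hA : ccLoopA s.toList 0 0 0 = (ccE s.toList, ccO s.toList) := by
      rw [ccLoopA_eq]; norm_num
    have hev : (PySem.List.slice? s.toList none none 2).getD [] = ccEvens s.toList := by
      rw [slice2_evens]; rfl
    have hod : (PySem.List.slice? s.toList (some 1) none 2).getD [] = ccEvens s.toList.tail := by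
      rw [slice2_odds]; rfl
    simp only [hA, hev, hod, PySem.List.foldl_add, ccE, ccO, zero_add]
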